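-- pv_equiv track=rewrite | github.com/nbriannl/Oboeru | convertFromElgin/parser.py | compressIndices
-- ===== SOURCE A (Python) =====
-- def compressIndices(indices):
--     if len(indices) == 1:
--         return [(indices[0], 1)]
--     length = 1
--     compressed_indices = []
--     for index in range(1, len(indices)):
--         currElem = indices[index]
--         prevElem = indices[index - 1]
--         if (currElem - prevElem) == 1:
--             length += 1
--         else:
--             compressed_indices.append((prevElem, length))
--             length = 1
--     prevElem = indices[-1]
--     compressed_indices.append((prevElem, length))
--     return compressed_indices
-- ===== SOURCE B (Python) =====
-- def compressIndices(indices):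
--     breaks = [i for i in range(1, len(indices)) if indices[i] - indices[i - 1] != 1]
--     bounds = [0] + breaks + [len(indices)]
--     return [(indices[e - 1], e - s) for s, e in zip(bounds, bounds[1:])]
-- ===== Notes on version B (the rewrite author's own statement) =====
-- stated objective: simpler
-- what changed: Replaces the stateful run-length accumulator loop with a boundary-based formulation: compute the list of break positions, form the segment bounds, and emit (last element, length) per segment by zipping adjacent bounds.
import Mathlib
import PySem

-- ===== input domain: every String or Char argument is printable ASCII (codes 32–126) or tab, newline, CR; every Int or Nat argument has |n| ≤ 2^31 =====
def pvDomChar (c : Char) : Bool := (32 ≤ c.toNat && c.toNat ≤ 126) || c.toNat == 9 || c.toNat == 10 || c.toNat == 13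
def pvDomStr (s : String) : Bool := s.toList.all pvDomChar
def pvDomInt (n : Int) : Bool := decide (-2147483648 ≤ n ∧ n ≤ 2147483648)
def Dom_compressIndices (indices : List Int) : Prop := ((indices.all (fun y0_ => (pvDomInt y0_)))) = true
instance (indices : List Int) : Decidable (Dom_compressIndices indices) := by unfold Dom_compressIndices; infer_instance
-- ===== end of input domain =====

-- B replaces the stateful accumulator loop with a break-position/segment-bounds formulation (simpler);
-- both raise IndexError on the empty list, excluded by Pre_.

-- ===== PORT A =====
def compressIndices (indices : List Int) : List (Int × Int) :=
  if indices.length = 1 then [(PySem.List.pyGetD indices 0 0, 1)]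
  else
    -- state: (length, compressed_indices)
    let st := (PySem.List.pyRange 1 (indices.length : Int) 1).foldl
      (fun (s : Int × List (Int × Int)) index =>
        let currElem := PySem.List.pyGetD indices index 0
        let prevElem := PySem.List.pyGetD indices (index - 1) 0
        if currElem - prevElem = 1 then (s.1 + 1, s.2)
        else (1, s.2 ++ [(prevElem, s.1)])) (1, [])
    let prevElem := PySem.List.pyGetD indices (-1) 0
    st.2 ++ [(prevElem, st.1)]

-- ===== PORT B =====
def compressIndices_alt (indices : List Int) : List (Int × Int) :=
  let breaks := (PySem.List.pyRange 1 (indices.length : Int) 1).filter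
      (fun i => decide (PySem.List.pyGetD indices i 0 - PySem.List.pyGetD indices (i - 1) 0 ≠ 1))
  let bounds := 0 :: (breaks ++ [(indices.length : Int)])
  (bounds.zip bounds.tail).map
      (fun p => (PySem.List.pyGetD indices (p.2 - 1) 0, p.2 - p.1))

-- ===== PRECONDITION & SPEC =====
-- A (and B) raise IndexError on the empty list (indices[-1]); Pre_ excludes exactly that input.
def Pre_compressIndices (indices : List Int) : Prop := indices ≠ []
instance (indices : List Int) : Decidable (Pre_compressIndices indices) := by unfold Pre_compressIndices; infer_instance
def pvWitness_compressIndices : List Int := [3, 4, 5, 9, 10, 2]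

def Spec_compressIndices (indices : List Int) (out : List (Int × Int)) : Prop := out = compressIndices_alt indices
instance (indices : List Int) (out : List (Int × Int)) : Decidable (Spec_compressIndices indices out) := by unfold Spec_compressIndices; infer_instance

-- ===== CLAIM (what is proved, stated in full; the proofs are below) =====
def Claim_equal_compressIndices : Prop := ∀ (indices : List Int), Dom_compressIndices indices → Pre_compressIndices indices → Spec_compressIndices indices (compressIndices indices)

-- ===== LEMMAS AND PROOFS =====

-- the run segments described by a start bound s and a list of break positions bs (final bound = indices.length)
def pairsFrom (indices : List Int) (s : Int) (bs : List Int) : List (Int × Int) :=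
  match bs with
  | [] => [(PySem.List.pyGetD indices ((indices.length : Int) - 1) 0, (indices.length : Int) - s)]
  | b :: bs' => (PySem.List.pyGetD indices (b - 1) 0, b - s) :: pairsFrom indices b bs'

-- indices[-1] = indices[len-1] on a nonempty list
theorem pyGetD_last (indices : List Int) (h : indices ≠ []) :
    PySem.List.pyGetD indices (-1) 0 = PySem.List.pyGetD indices ((indices.length : Int) - 1) 0 := by
  have hlen : 0 < indices.length := List.length_pos_iff.mpr h
  rw [PySem.List.pyGetD_neg_ofNat indices 1 0 (by omega) (by omega)]
  rw [PySem.List.pyGetD_eq_getElem indices 0 (by omega) (by omega)]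
  congr 1
  omega

-- A's accumulator loop over range(k, len) equals the segment decomposition starting at bound k - L
theorem fold_eq (indices : List Int) (n : Nat) : ∀ (k L : Int) (acc : List (Int × Int)),
    1 ≤ k → k + n = (indices.length : Int) →
    (((PySem.List.pyRange k (indices.length : Int) 1).foldl
      (fun (s : Int × List (Int × Int)) index =>
        let currElem := PySem.List.pyGetD indices index 0
        let prevElem := PySem.List.pyGetD indices (index - 1) 0
        if currElem - prevElem = 1 then (s.1 + 1, s.2)
        else (1, s.2 ++ [(prevElem, s.1)])) (L, acc)).2
      ++ [(PySem.List.pyGetD indices ((indices.length : Int) - 1) 0,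
           ((PySem.List.pyRange k (indices.length : Int) 1).foldl
      (fun (s : Int × List (Int × Int)) index =>
        let currElem := PySem.List.pyGetD indices index 0
        let prevElem := PySem.List.pyGetD indices (index - 1) 0
        if currElem - prevElem = 1 then (s.1 + 1, s.2)
        else (1, s.2 ++ [(prevElem, s.1)])) (L, acc)).1)])
    = acc ++ pairsFrom indices (k - L)
        ((PySem.List.pyRange k (indices.length : Int) 1).filter
          (fun i => decide (PySem.List.pyGetD indices i 0 - PySem.List.pyGetD indices (i - 1) 0 ≠ 1))) := by
  induction n with
  | zero =>
    intro k L acc hk hkn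
    rw [PySem.List.pyRange_one_eq_nil (by omega)]
    simp [pairsFrom]
    omega
  | succ m ih =>
    intro k L acc hk hkn
    rw [PySem.List.pyRange_one_cons (by omega)]
    simp only [List.foldl_cons, List.filter_cons]
    by_cases h : PySem.List.pyGetD indices k 0 - PySem.List.pyGetD indices (k - 1) 0 = 1
    · have hd : (decide (PySem.List.pyGetD indices k 0 - PySem.List.pyGetD indices (k - 1) 0 ≠ 1)) = false := by
        simp [h]
      rw [hd]
      simp only [Bool.false_eq_true, if_false, if_pos h]
      have := ih (k + 1) (L + 1) acc (by omega) (by omega)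
      rw [show k + 1 - (L + 1) = k - L by omega] at this
      exact this
    · have hd : (decide (PySem.List.pyGetD indices k 0 - PySem.List.pyGetD indices (k - 1) 0 ≠ 1)) = true := by
        simp [h]
      rw [hd]
      simp only [if_true, if_neg h]
      rw [ih (k + 1) 1 (acc ++ [(PySem.List.pyGetD indices (k - 1) 0, L)]) (by omega) (by omega)]
      simp [pairsFrom, show k - (k - L) = L by omega, show k + 1 - 1 = k by omega]

-- B's zip-of-adjacent-bounds construction equals the same segment decomposition
theorem zip_eq (indices : List Int) (bs : List Int) : ∀ (s : Int),
    (((s :: (bs ++ [(indices.length : Int)])).zip (bs ++ [(indices.length : Int)])).map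
      (fun p => (PySem.List.pyGetD indices (p.2 - 1) 0, p.2 - p.1)))
    = pairsFrom indices s bs := by
  induction bs with
  | nil => intro s; simp [pairsFrom]
  | cons b bs' ih =>
    intro s
    simp only [List.cons_append, List.zip_cons_cons, List.map_cons, pairsFrom]
    rw [ih b]

-- ===== VERDICT (by name: the statement is the Claim_ definition above) =====
theorem compressIndices_spec : Claim_equal_compressIndices := by
  intro indices _ hpre
  unfold Spec_compressIndices compressIndices compressIndices_alt
  dsimp only
  have hlen : 0 < indices.length := List.length_pos_iff.mpr hpre
  by_cases h1 : indices.length = 1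
  · rw [if_pos h1]
    rw [show ((indices.length : Int)) = 1 from by omega]
    rw [PySem.List.pyRange_one_eq_nil (le_refl 1)]
    simp
  · rw [if_neg h1]
    rw [pyGetD_last indices hpre]
    rw [fold_eq indices (indices.length - 1) 1 1 [] (by omega) (by omega)]
    simp only [List.nil_append, List.tail_cons, show (1 : Int) - 1 = 0 from rfl]
    exact (zip_eq indices _ 0).symm
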